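-- pv_equiv track=rewrite | github.com/liboyin/algo-prac | arrays/removal_of_triples.py | search
-- ===== SOURCE A (Python) =====
-- def search(arr, gap):
--     """
--     Given an int array and an integer gap. Repeatedly remove contiguous triples of (x-k, x, x+k).
--     Returns the minimum array size after reduction.
--     Solution is DP. Time complexity is O(n^2). Space complexity is O(n^2).
--     :param arr: list[int]
--     :param gap: int
--     :return: int, non-negative
--     """
--     def step(low, high):  # inclusive low & high
--         if high - low < 2:
--             return high - low + 1
--         if (low, high) in cache:
--             return cache[low, high]
--         min_len = step(low + 1, high)  # arr[low] is not to be removed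
--         for i in range(low + 1, high):  # remove (low, i, j)
--             for j in range(i+1, high+1):
--                 if arr[i] - arr[low] == arr[j] - arr[i] == gap and step(low+1, i-1) == step(i+1, j-1) == 0:
--                     min_len = min(min_len, step(j+1, high))
--         cache[low, high] = min_len
--         return min_len
--     cache = dict()
--     return step(0, len(arr) - 1)
-- ===== SOURCE B (Python) =====
-- def search(arr, gap):
--     """Bottom-up interval DP: fill best[(low, high)] by increasing interval length,
--     skipping the inner j-scan as soon as index i cannot open a removable triple."""
--     n = len(arr)
--     best = {}
--
--     def get(low, high):  # value of an interval; short/empty intervals by the base rule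
--         if high - low < 2:
--             return high - low + 1
--         return best[low, high]
--
--     for length in range(3, n + 1):
--         for low in range(0, n - length + 1):
--             high = low + length - 1
--             m = get(low + 1, high)
--             for i in range(low + 1, high):
--                 if arr[i] - arr[low] != gap or get(low + 1, i - 1) != 0:
--                     continue
--                 for j in range(i + 1, high + 1):
--                     if arr[j] - arr[i] == gap and get(i + 1, j - 1) == 0:
--                         m = min(m, get(j + 1, high))
--             best[low, high] = m
--     return get(0, n - 1)
-- ===== Notes on version B (the rewrite author's own statement) =====
-- stated objective: alternative
-- what changed: Replaces A's top-down memoized recursion (closure + cache dict) with a bottom-up interval DP that fills a table by increasing interval length, and skips each inner j-scan early when index i cannot open a removable triple; same worst-case cost class.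
import Mathlib
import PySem

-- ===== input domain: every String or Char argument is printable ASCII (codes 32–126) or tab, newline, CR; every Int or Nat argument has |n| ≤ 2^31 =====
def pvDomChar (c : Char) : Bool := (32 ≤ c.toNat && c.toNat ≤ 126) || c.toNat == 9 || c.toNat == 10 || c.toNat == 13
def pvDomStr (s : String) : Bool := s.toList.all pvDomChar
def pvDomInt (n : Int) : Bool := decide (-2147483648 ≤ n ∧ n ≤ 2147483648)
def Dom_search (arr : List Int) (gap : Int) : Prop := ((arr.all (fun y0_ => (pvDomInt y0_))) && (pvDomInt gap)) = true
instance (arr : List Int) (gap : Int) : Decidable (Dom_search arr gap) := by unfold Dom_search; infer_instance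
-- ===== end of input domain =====

-- B is a bottom-up interval-DP table filled by increasing length, replacing A's memoized recursion; equal return values (same cost class).

-- ===== PORT A =====
-- A's `step` is a memoized recursion; the cache only memoizes (it never changes a value), so the
-- port is the recursion itself, made total with a fuel argument that the top call supplies
-- amply (fuel = len(arr); every recursive call strictly shrinks the interval).
-- arr[i] is ported as pyGetD arr i 0: every index reached from `search` is in range, so this is exact.
def stepA (arr : List Int) (gap : Int) : Nat → Int → Int → Int
  | 0, low, high => high - low + 1
  | n+1, low, high =>
    if high - low < 2 then high - low + 1
    else
      (PySem.List.pyRange (low+1) high 1).foldl (fun acc i =>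
        (PySem.List.pyRange (i+1) (high+1) 1).foldl (fun acc2 j =>
          if PySem.List.pyGetD arr i 0 - PySem.List.pyGetD arr low 0
               = PySem.List.pyGetD arr j 0 - PySem.List.pyGetD arr i 0
             ∧ PySem.List.pyGetD arr j 0 - PySem.List.pyGetD arr i 0 = gap
             ∧ stepA arr gap n (low+1) (i-1) = stepA arr gap n (i+1) (j-1)
             ∧ stepA arr gap n (i+1) (j-1) = 0
          then min acc2 (stepA arr gap n (j+1) high) else acc2) acc)
        (stepA arr gap n (low+1) high)

def search (arr : List Int) (gap : Int) : Int :=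
  stepA arr gap arr.length 0 ((arr.length : Int) - 1)

-- ===== PORT B =====
-- Source B's `get`: short/empty intervals by the base rule, otherwise the table entry
-- (best[low, high] is ported as getD _ 0: every key queried by search_alt was inserted before).
def getT (best : PySem.Dict (Int × Int) Int) (low high : Int) : Int :=
  if high - low < 2 then high - low + 1 else best.getD (low, high) 0

-- body of Source B's inner loops for the interval (low, low+len-1): the j-scan is skipped
-- (`continue`) unless index i can open a removable triple
def bInner (arr : List Int) (gap : Int) (best : PySem.Dict (Int × Int) Int) (low len : Int) : Int :=
  (PySem.List.pyRange (low+1) (low+len-1) 1).foldl (fun acc i =>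
    if PySem.List.pyGetD arr i 0 - PySem.List.pyGetD arr low 0 ≠ gap
       ∨ getT best (low+1) (i-1) ≠ 0 then acc
    else
      (PySem.List.pyRange (i+1) (low+len) 1).foldl (fun acc2 j =>
        if PySem.List.pyGetD arr j 0 - PySem.List.pyGetD arr i 0 = gap
           ∧ getT best (i+1) (j-1) = 0
        then min acc2 (getT best (j+1) (low+len-1)) else acc2) acc)
    (getT best (low+1) (low+len-1))

-- one pass of the outer loop: fill all intervals of length `len`
def bStep (arr : List Int) (gap : Int) (best : PySem.Dict (Int × Int) Int) (len : Int) : PySem.Dict (Int × Int) Int :=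
  (PySem.List.pyRange 0 ((arr.length : Int) - len + 1) 1).foldl
    (fun b low => b.insert (low, low + len - 1) (bInner arr gap b low len)) best

def search_alt (arr : List Int) (gap : Int) : Int :=
  let n : Int := arr.length
  let best := (PySem.List.pyRange 3 (n+1) 1).foldl (bStep arr gap) PySem.Dict.empty
  getT best 0 (n-1)

-- ===== PRECONDITION & SPEC =====
def Spec_search (arr : List Int) (gap : Int) (out : Int) : Prop := out = search_alt arr gap
instance (arr : List Int) (gap : Int) (out : Int) : Decidable (Spec_search arr gap out) := by unfold Spec_search; infer_instance

-- ===== CLAIM (what is proved, stated in full; the proofs are below) =====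
def Claim_equal_search : Prop := ∀ (arr : List Int) (gap : Int), Dom_search arr gap → Spec_search arr gap (search arr gap)

-- ===== LEMMAS AND PROOFS =====

-- the interval value: stepA with just enough fuel
def V (arr : List Int) (gap : Int) (low high : Int) : Int :=
  stepA arr gap (high - low).toNat low high

lemma stepA_base (arr : List Int) (gap : Int) (n : Nat) (low high : Int)
    (h : high - low < 2) : stepA arr gap n low high = high - low + 1 := by
  cases n with
  | zero => rfl
  | succ n => simp [stepA, h]

lemma stepA_drop (arr : List Int) (gap : Int) :
    ∀ (n : Nat) (low high : Int), (high - low).toNat ≤ n →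
      stepA arr gap (n+1) low high = stepA arr gap n low high := by
  intro n
  induction n with
  | zero =>
    intro low high h
    have : high - low < 2 := by omega
    rw [stepA_base arr gap _ _ _ this, stepA_base arr gap _ _ _ this]
  | succ n ih =>
    intro low high h
    by_cases hb : high - low < 2
    · rw [stepA_base arr gap _ _ _ hb, stepA_base arr gap _ _ _ hb]
    · show stepA arr gap (n+2) low high = stepA arr gap (n+1) low high
      conv_lhs => rw [stepA]
      conv_rhs => rw [stepA]
      rw [if_neg hb, if_neg hb]
      rw [ih (low+1) high (by omega)]
      apply PySem.List.foldl_congr_mem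
      intro acc i hi
      rw [PySem.List.mem_pyRange_one] at hi
      apply PySem.List.foldl_congr_mem
      intro acc2 j hj
      rw [PySem.List.mem_pyRange_one] at hj
      rw [ih (low+1) (i-1) (by omega), ih (i+1) (j-1) (by omega), ih (j+1) high (by omega)]

lemma stepA_eq_V (arr : List Int) (gap : Int) :
    ∀ (n : Nat) (low high : Int), (high - low).toNat ≤ n →
      stepA arr gap n low high = V arr gap low high := by
  intro n
  induction n with
  | zero =>
    intro low high h
    unfold V
    have : (high - low).toNat = 0 := by omega
    rw [this]
  | succ n ih =>
    intro low high h
    by_cases hle : (high - low).toNat ≤ n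
    · rw [stepA_drop arr gap n low high hle, ih low high hle]
    · unfold V
      have : (high - low).toNat = n + 1 := by omega
      rw [this]

lemma V_base (arr : List Int) (gap : Int) (low high : Int) (h : high - low < 2) :
    V arr gap low high = high - low + 1 := stepA_base arr gap _ low high h

lemma V_rec (arr : List Int) (gap : Int) (low high : Int) (h : 2 ≤ high - low) :
    V arr gap low high =
      (PySem.List.pyRange (low+1) high 1).foldl (fun acc i =>
        (PySem.List.pyRange (i+1) (high+1) 1).foldl (fun acc2 j =>
          if PySem.List.pyGetD arr i 0 - PySem.List.pyGetD arr low 0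
               = PySem.List.pyGetD arr j 0 - PySem.List.pyGetD arr i 0
             ∧ PySem.List.pyGetD arr j 0 - PySem.List.pyGetD arr i 0 = gap
             ∧ V arr gap (low+1) (i-1) = V arr gap (i+1) (j-1)
             ∧ V arr gap (i+1) (j-1) = 0
          then min acc2 (V arr gap (j+1) high) else acc2) acc)
        (V arr gap (low+1) high) := by
  have hm : ∃ m : Nat, (high - low).toNat = m + 1 := ⟨(high - low).toNat - 1, by omega⟩
  obtain ⟨m, hm⟩ := hm
  have hmb : (high - low).toNat ≤ m + 1 := by omega
  unfold V
  rw [hm]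
  show stepA arr gap (m+1) low high = _
  conv_lhs => rw [stepA]
  rw [if_neg (by omega : ¬ high - low < 2)]
  rw [stepA_eq_V arr gap m (low+1) high (by omega)]
  apply PySem.List.foldl_congr_mem
  intro acc i hi
  rw [PySem.List.mem_pyRange_one] at hi
  apply PySem.List.foldl_congr_mem
  intro acc2 j hj
  rw [PySem.List.mem_pyRange_one] at hj
  rw [stepA_eq_V arr gap m (low+1) (i-1) (by omega),
      stepA_eq_V arr gap m (i+1) (j-1) (by omega),
      stepA_eq_V arr gap m (j+1) high (by omega)]
  simp only [V]

-- table invariant: every interval inside the array of length (high-low+1) ≤ L has its value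
def Good (arr : List Int) (gap : Int) (L : Int) (best : PySem.Dict (Int × Int) Int) : Prop :=
  ∀ low high : Int, 0 ≤ low → high ≤ (arr.length : Int) - 1 → high - low + 1 ≤ L →
    getT best low high = V arr gap low high

lemma foldl_keep {α : Type} (l : List α) (init : Int) :
    l.foldl (fun acc _ => acc) init = init := by
  induction l generalizing init with
  | nil => rfl
  | cons x xs ih => exact ih init

lemma bInner_eq_V (arr : List Int) (gap : Int) (best : PySem.Dict (Int × Int) Int)
    (low len : Int) (hlen : 3 ≤ len) (hlow : 0 ≤ low)
    (hhigh : low + len - 1 ≤ (arr.length : Int) - 1)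
    (hG : Good arr gap (len - 1) best) :
    bInner arr gap best low len = V arr gap low (low + len - 1) := by
  rw [V_rec arr gap low (low + len - 1) (by omega)]
  have hrng : low + len - 1 + 1 = low + len := by ring
  rw [hrng]
  unfold bInner
  have e0 : getT best (low+1) (low+len-1) = V arr gap (low+1) (low+len-1) :=
    hG _ _ (by omega) (by omega) (by omega)
  rw [e0]
  apply PySem.List.foldl_congr_mem
  intro acc i hi
  rw [PySem.List.mem_pyRange_one] at hi
  rw [hG (low+1) (i-1) (by omega) (by omega) (by omega)]
  by_cases hc : PySem.List.pyGetD arr i 0 - PySem.List.pyGetD arr low 0 = gap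
      ∧ V arr gap (low+1) (i-1) = 0
  · rw [if_neg (by omega)]
    apply PySem.List.foldl_congr_mem
    intro acc2 j hj
    rw [PySem.List.mem_pyRange_one] at hj
    rw [hG (i+1) (j-1) (by omega) (by omega) (by omega),
        hG (j+1) (low+len-1) (by omega) (by omega) (by omega)]
    have hiff : (PySem.List.pyGetD arr j 0 - PySem.List.pyGetD arr i 0 = gap
          ∧ V arr gap (i+1) (j-1) = 0)
        ↔ (PySem.List.pyGetD arr i 0 - PySem.List.pyGetD arr low 0
             = PySem.List.pyGetD arr j 0 - PySem.List.pyGetD arr i 0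
           ∧ PySem.List.pyGetD arr j 0 - PySem.List.pyGetD arr i 0 = gap
           ∧ V arr gap (low+1) (i-1) = V arr gap (i+1) (j-1)
           ∧ V arr gap (i+1) (j-1) = 0) := by
      obtain ⟨h1, h2⟩ := hc
      constructor
      · rintro ⟨hb, hz⟩; exact ⟨by omega, hb, by omega, hz⟩
      · rintro ⟨-, hb, -, hz⟩; exact ⟨hb, hz⟩
    rw [if_congr hiff rfl rfl]
  · rw [if_pos (by omega)]
    rw [PySem.List.foldl_congr_mem _ _ (fun acc2 _ => acc2) _ ?_, foldl_keep]
    intro acc2 j hj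
    rw [if_neg]
    rintro ⟨h1, h2, h3, h4⟩
    exact hc ⟨by omega, by omega⟩

lemma getT_insert_of_span_ne (best : PySem.Dict (Int × Int) Int) (k : Int × Int) (v : Int)
    (low high : Int) (hne : (low, high) ≠ k) :
    getT (best.insert k v) low high = getT best low high := by
  unfold getT
  rw [PySem.Dict.getD_insert]
  simp [hne]

lemma bStep_inner (arr : List Int) (gap : Int) (len : Int) (hlen : 3 ≤ len) :
    ∀ (cnt : Nat) (lo : Int) (best : PySem.Dict (Int × Int) Int),
      0 ≤ lo → lo + cnt = (arr.length : Int) - len + 1 →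
      Good arr gap (len - 1) best →
      (∀ low, 0 ≤ low → low < lo →
        getT best low (low + len - 1) = V arr gap low (low + len - 1)) →
      Good arr gap len
        ((PySem.List.pyRange lo ((arr.length : Int) - len + 1) 1).foldl
          (fun b low => b.insert (low, low + len - 1) (bInner arr gap b low len)) best) := by
  intro cnt
  induction cnt with
  | zero =>
    intro lo best hlo hcnt hG hdone
    rw [PySem.List.pyRange_one_eq_nil (by omega)]
    intro low high h0 h1 h2
    by_cases hs : high - low + 1 ≤ len - 1
    · exact hG low high h0 h1 hs
    · have hhigh : high = low + len - 1 := by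
        by_cases hlt : high - low < 2
        · omega
        · -- spans of length exactly len: Good len only constrains spans ≤ len
          omega
      subst hhigh
      exact hdone low h0 (by omega)
  | succ cnt ih =>
    intro lo best hlo hcnt hG hdone
    rw [PySem.List.pyRange_one_cons (by omega)]
    simp only [List.foldl_cons]
    apply ih (lo+1) _ (by omega) (by omega)
    · -- Good (len-1) is preserved: the inserted key has span len-1 > len-2
      intro low high h0 h1 h2
      rw [getT_insert_of_span_ne _ _ _ _ _ (by intro hk; injection hk with hk1 hk2; omega)]
      exact hG low high h0 h1 h2
    · intro low h0 hlt
      by_cases heq : low = lo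
      · subst heq
        unfold getT
        rw [if_neg (by omega), PySem.Dict.getD_insert, if_pos rfl]
        exact bInner_eq_V arr gap best low len hlen h0 (by omega) hG
      · rw [getT_insert_of_span_ne _ _ _ _ _ (by intro hk; injection hk with hk1 hk2; omega)]
        exact hdone low h0 (by omega)

lemma tableGood (arr : List Int) (gap : Int) :
    ∀ len : Int, 2 ≤ len → len ≤ (arr.length : Int) →
      Good arr gap len ((PySem.List.pyRange 3 (len+1) 1).foldl (bStep arr gap) PySem.Dict.empty) := by
  intro len hlen
  induction len, hlen using Int.le_induction with
  | base =>
    intro _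
    rw [PySem.List.pyRange_one_eq_nil (by omega)]
    intro low high h0 h1 h2
    rw [getT, if_pos (by omega), V_base arr gap low high (by omega)]
  | succ len hlen ih =>
    intro hn
    rw [PySem.List.pyRange_one_succ_right (by omega : (3:Int) ≤ len + 1), List.foldl_append]
    simp only [List.foldl_cons, List.foldl_nil]
    unfold bStep
    have hG : Good arr gap len ((PySem.List.pyRange 3 (len+1) 1).foldl (bStep arr gap) PySem.Dict.empty) :=
      ih (by omega)
    exact bStep_inner arr gap (len+1) (by omega)
      ((arr.length : Int) - (len+1) + 1).toNat 0 _ (by omega) (by omega)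
      (by rw [show len + 1 - 1 = len from by ring]; exact hG)
      (by intro low h0 h; exact absurd h (by omega))

-- ===== VERDICT (by name: the statement is the Claim_ definition above) =====
theorem search_spec : Claim_equal_search := by
  intro arr gap _
  unfold Spec_search search search_alt
  rw [stepA_eq_V arr gap arr.length 0 ((arr.length : Int) - 1) (by omega)]
  by_cases hn : (arr.length : Int) ≤ 2
  · rw [getT, if_pos (by omega), V_base arr gap 0 _ (by omega)]
  · exact (tableGood arr gap (arr.length : Int) (by omega) (by omega) 0 _ (by omega) (by omega) (by omega)).symm
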